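-- pv_equiv track=rewrite | github.com/pypi-data/pypi-mirror-400 | packages/fluxem/fluxem-1.0.1.tar.gz/fluxem-1.0.1/fluxem/domains/music/__init__.py | invariant_under_TnI
-- ===== SOURCE A (Python) =====
-- from typing import Any, Dict, List, Optional, Tuple, Union
--
-- def invariant_under_TnI(pcs: List[int]) -> List[int]:
--     """
--     Find all TnI invariants (TnI(S) = S).
--
--     """
--     invariants = []
--
--     sorted_pcs = sorted(set(pc % 12 for pc in pcs))
--
--     for n in range(12):
--         inverted = sorted([((11 - pc) % 12) for pc in sorted_pcs])
--         transposed = sorted([(pc + n) % 12 for pc in inverted])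
--
--         if transposed == sorted_pcs:
--             invariants.append(n)
--
--     return invariants
-- ===== SOURCE B (Python) =====
-- def invariant_under_TnI(pcs):
--     """
--     Find all TnI invariants (TnI(S) = S).
--     """
--     s = {pc % 12 for pc in pcs}
--     sums = [0] * 12
--     for x in s:
--         for y in s:
--             sums[(x + y) % 12] += 1
--     return [n for n in range(12) if sums[(n + 11) % 12] == len(s)]
-- ===== Notes on version B (the rewrite author's own statement) =====
-- stated objective: alternative
-- what changed: Instead of testing each of the 12 levels by applying the inversion map, B builds a 12-bucket histogram of pairwise sums (x+y) mod 12 over the residue set S once, and reads off the invariant levels as those n whose index (n+11) mod 12 has |S| pairs (TnI fixes S iff every x in S pairs with some y in S summing to n+11 mod 12).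
import Mathlib
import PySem

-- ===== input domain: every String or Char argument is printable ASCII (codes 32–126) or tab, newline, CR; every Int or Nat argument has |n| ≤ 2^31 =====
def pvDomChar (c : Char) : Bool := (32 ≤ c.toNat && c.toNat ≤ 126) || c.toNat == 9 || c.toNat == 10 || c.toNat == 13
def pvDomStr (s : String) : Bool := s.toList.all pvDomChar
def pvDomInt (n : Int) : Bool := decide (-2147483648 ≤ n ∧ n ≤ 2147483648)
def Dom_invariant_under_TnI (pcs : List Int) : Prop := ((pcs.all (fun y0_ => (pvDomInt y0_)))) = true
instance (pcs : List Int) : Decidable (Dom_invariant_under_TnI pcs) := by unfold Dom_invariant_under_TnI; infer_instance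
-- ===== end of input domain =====

-- B replaces A's per-level inversion-and-compare by one pairwise-sum histogram over the residue
-- set, reading each level off a bucket count (alternative algorithm; same results).

-- ===== PORT A =====
def invariant_under_TnI (pcs : List Int) : List Int :=
  let sorted_pcs := PySem.List.sorted
    (PySem.Set.ofList (pcs.map (fun pc => PySem.Int.mod pc 12))) (fun x => x) false
  (PySem.List.pyRange 0 12 1).foldl (fun invariants n =>
    let inverted := PySem.List.sorted
      (sorted_pcs.map (fun pc => PySem.Int.mod (11 - pc) 12)) (fun x => x) false
    let transposed := PySem.List.sorted
      (inverted.map (fun pc => PySem.Int.mod (pc + n) 12)) (fun x => x) false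
    if transposed = sorted_pcs then invariants ++ [n] else invariants) []

-- ===== PORT B =====
-- sums[(x+y)%12] += 1 : index is always in [0,12) = len(sums), so pyGetD/pySetD are exact.
-- The histogram is iteration-order independent, so folding over the Set's list is exact.
def invariant_under_TnI_alt (pcs : List Int) : List Int :=
  let s : PySem.Set Int := PySem.Set.ofList (pcs.map (fun pc => PySem.Int.mod pc 12))
  let sums : List Int :=
    s.foldl (fun sums x =>
      s.foldl (fun sums y =>
        PySem.List.pySetD sums (PySem.Int.mod (x + y) 12)
          (PySem.List.pyGetD sums (PySem.Int.mod (x + y) 12) 0 + 1)) sums)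
      (List.replicate 12 0)
  (PySem.List.pyRange 0 12 1).filter
    (fun n => PySem.List.pyGetD sums (PySem.Int.mod (n + 11) 12) 0 == PySem.Set.len s)

-- ===== PRECONDITION & SPEC =====
def Spec_invariant_under_TnI (pcs : List Int) (out : List Int) : Prop := out = invariant_under_TnI_alt pcs
instance (pcs : List Int) (out : List Int) : Decidable (Spec_invariant_under_TnI pcs out) := by unfold Spec_invariant_under_TnI; infer_instance

-- ===== CLAIM (what is proved, stated in full; the proofs are below) =====
def Claim_equal_invariant_under_TnI : Prop := ∀ (pcs : List Int), Dom_invariant_under_TnI pcs → Spec_invariant_under_TnI pcs (invariant_under_TnI pcs)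

-- ===== LEMMAS AND PROOFS =====

theorem pv_mod12_range (a : Int) : 0 ≤ PySem.Int.mod a 12 ∧ PySem.Int.mod a 12 < 12 := by
  rw [PySem.Int.mod_eq_emod_of_pos (by norm_num)]
  omega

theorem pv_mod12_comp (pc n : Int) :
    PySem.Int.mod (PySem.Int.mod (11 - pc) 12 + n) 12 = PySem.Int.mod (11 - pc + n) 12 := by
  rw [PySem.Int.mod_eq_emod_of_pos (b := 12) (by norm_num),
      PySem.Int.mod_eq_emod_of_pos (b := 12) (by norm_num),
      PySem.Int.mod_eq_emod_of_pos (b := 12) (by norm_num)]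
  omega

theorem pv_mod12_inj (x y n : Int) (hx : 0 ≤ x ∧ x < 12) (hy : 0 ≤ y ∧ y < 12)
    (h : PySem.Int.mod (11 - x + n) 12 = PySem.Int.mod (11 - y + n) 12) : x = y := by
  rw [PySem.Int.mod_eq_emod_of_pos (b := 12) (by norm_num),
      PySem.Int.mod_eq_emod_of_pos (b := 12) (by norm_num)] at h
  omega

-- core: for a strictly increasing list, sorted(map f L) = L iff f maps L into L (f injective on L)
theorem pv_sorted_map_eq_self_iff (L : List Int) (f : Int → Int)
    (hL : L.Pairwise (· < ·))
    (hinj : ∀ x ∈ L, ∀ y ∈ L, f x = f y → x = y) :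
    (PySem.List.sorted (L.map f) (fun x => x) false = L) ↔ ∀ x ∈ L, f x ∈ L := by
  constructor
  · intro h x hx
    have hperm : (L.map f).Perm L := by
      have hp := PySem.List.sorted_perm (L.map f) (fun x => x) false
      rw [h] at hp
      exact hp.symm
    exact hperm.mem_iff.mp (List.mem_map_of_mem hx)
  · intro h
    have hnd : L.Nodup := hL.imp (fun hlt => ne_of_lt hlt)
    have hndm : (L.map f).Nodup := hnd.map_on hinj
    have hsub : (L.map f) ⊆ L := by
      intro y hy
      obtain ⟨x, hx, rfl⟩ := List.mem_map.mp hy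
      exact h x hx
    have hperm : (L.map f).Perm L :=
      (List.subperm_of_subset hndm hsub).perm_of_length_le (by simp)
    calc PySem.List.sorted (L.map f) (fun x => x) false
        = PySem.List.sorted L (fun x => x) false :=
          PySem.List.sorted_eq_sorted_of_perm _ _ _ (fun a b hab => hab) hperm
      _ = L := PySem.List.sorted_eq_self_of_pairwise L (fun x => x)
          (hL.imp (fun hlt => le_of_lt hlt))

-- A's per-n test ⟺ every element of S maps back into S under TnI
theorem pv_A_test (pcs : List Int) (n : Int) :
    (PySem.List.sorted
        ((PySem.List.sorted
            ((PySem.List.sorted (PySem.Set.ofList (pcs.map (fun pc => PySem.Int.mod pc 12)))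
                (fun x => x) false).map (fun pc => PySem.Int.mod (11 - pc) 12))
            (fun x => x) false).map (fun pc => PySem.Int.mod (pc + n) 12))
        (fun x => x) false
      = PySem.List.sorted (PySem.Set.ofList (pcs.map (fun pc => PySem.Int.mod pc 12)))
          (fun x => x) false)
    ↔ (∀ x ∈ PySem.Set.ofList (pcs.map (fun pc => PySem.Int.mod pc 12)),
        PySem.Int.mod (11 - x + n) 12 ∈ PySem.Set.ofList (pcs.map (fun pc => PySem.Int.mod pc 12))) := by
  set S := PySem.Set.ofList (pcs.map (fun pc => PySem.Int.mod pc 12)) with hS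
  set L := PySem.List.sorted S (fun x => x) false with hLdef
  have hmemL : ∀ x, x ∈ L ↔ x ∈ S := fun x => PySem.List.mem_sorted S (fun x => x) false x
  have hrange : ∀ x ∈ L, 0 ≤ x ∧ x < 12 := by
    intro x hx
    have hxS : x ∈ S := (hmemL x).mp hx
    have hxm : x ∈ pcs.map (fun pc => PySem.Int.mod pc 12) :=
      (PySem.Set.mem_ofList (pcs.map (fun pc => PySem.Int.mod pc 12)) x).mp (hS ▸ hxS)
    obtain ⟨pc, _, rfl⟩ := List.mem_map.mp hxm
    exact pv_mod12_range pc
  have hcollapse :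
      PySem.List.sorted
        ((PySem.List.sorted (L.map (fun pc => PySem.Int.mod (11 - pc) 12)) (fun x => x) false).map
          (fun pc => PySem.Int.mod (pc + n) 12)) (fun x => x) false
      = PySem.List.sorted (L.map (fun pc => PySem.Int.mod (11 - pc + n) 12)) (fun x => x) false := by
    have hp : ((PySem.List.sorted (L.map (fun pc => PySem.Int.mod (11 - pc) 12)) (fun x => x)
        false).map (fun pc => PySem.Int.mod (pc + n) 12)).Perm
        ((L.map (fun pc => PySem.Int.mod (11 - pc) 12)).map
          (fun pc => PySem.Int.mod (pc + n) 12)) :=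
      List.Perm.map _ (PySem.List.sorted_perm _ _ false)
    rw [PySem.List.sorted_eq_sorted_of_perm _ _ _ (fun a b hab => hab) hp, List.map_map]
    congr 1
    apply List.map_congr_left
    intro pc _
    simp only [Function.comp]
    exact pv_mod12_comp pc n
  rw [hcollapse,
    pv_sorted_map_eq_self_iff L _ (hLdef ▸ hS ▸ PySem.List.sorted_ofList_pairwise_lt _)
      (fun x hx y hy h => pv_mod12_inj x y n (hrange x hx) (hrange y hy) h)]
  constructor
  · intro h x hx
    exact (hmemL _).mp (h x ((hmemL x).mpr hx))
  · intro h x hx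
    exact (hmemL _).mpr (h x ((hmemL x).mp hx))

-- get-after-set on a list of length 12, both indices in range
theorem pv_get_set (acc : List Int) (i m v : Int) (hlen : acc.length = 12)
    (hi : 0 ≤ i ∧ i < 12) (hm : 0 ≤ m ∧ m < 12) :
    PySem.List.pyGetD (PySem.List.pySetD acc i v) m 0
      = if m = i then v else PySem.List.pyGetD acc m 0 := by
  rw [PySem.List.pySetD_of_nonneg acc v hi.1,
      PySem.List.pyGetD_eq_getElem _ 0 hm.1 (by rw [List.length_set]; push_cast [hlen]; omega),
      List.getElem_set]
  split_ifs with h1 h2 h3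
  · rfl
  · omega
  · omega
  · rw [PySem.List.pyGetD_eq_getElem _ 0 hm.1 (by push_cast [hlen]; omega)]

theorem pv_length_inner (ys acc : List Int) (x : Int) :
    (ys.foldl (fun sums y =>
      PySem.List.pySetD sums (PySem.Int.mod (x + y) 12)
        (PySem.List.pyGetD sums (PySem.Int.mod (x + y) 12) 0 + 1)) acc).length = acc.length := by
  induction ys generalizing acc with
  | nil => rfl
  | cons y ys ih =>
      simp only [List.foldl_cons]
      rw [ih, PySem.List.length_pySetD]

-- inner loop: bucket m gains one for each y with (x+y)%12 = m
theorem pv_inner (ys acc : List Int) (x m : Int) (hlen : acc.length = 12)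
    (hm : 0 ≤ m ∧ m < 12) :
    PySem.List.pyGetD (ys.foldl (fun sums y =>
      PySem.List.pySetD sums (PySem.Int.mod (x + y) 12)
        (PySem.List.pyGetD sums (PySem.Int.mod (x + y) 12) 0 + 1)) acc) m 0
    = PySem.List.pyGetD acc m 0 + (ys.countP (fun y => decide (PySem.Int.mod (x + y) 12 = m)) : Int) := by
  induction ys generalizing acc with
  | nil => simp
  | cons y ys ih =>
      simp only [List.foldl_cons]
      rw [ih _ (by rw [PySem.List.length_pySetD, hlen]),
          pv_get_set acc _ m _ hlen (pv_mod12_range _) hm, List.countP_cons]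
      by_cases h : PySem.Int.mod (x + y) 12 = m
      · rw [if_pos h.symm, h, if_pos (show decide (m = m) = true by simp)]
        push_cast
        ring
      · rw [if_neg (fun e => h e.symm), decide_eq_false h]
        push_cast
        ring

-- outer loop: bucket m = sum over x of the inner counts
theorem pv_outer (xs ys acc : List Int) (m : Int) (hlen : acc.length = 12)
    (hm : 0 ≤ m ∧ m < 12) :
    PySem.List.pyGetD (xs.foldl (fun sums x =>
      ys.foldl (fun sums y =>
        PySem.List.pySetD sums (PySem.Int.mod (x + y) 12)
          (PySem.List.pyGetD sums (PySem.Int.mod (x + y) 12) 0 + 1)) sums) acc) m 0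
    = PySem.List.pyGetD acc m 0
      + (xs.map (fun x => ((ys.countP (fun y => decide (PySem.Int.mod (x + y) 12 = m)) : Nat) : Int))).sum := by
  induction xs generalizing acc with
  | nil => simp
  | cons x xs ih =>
      simp only [List.foldl_cons, List.map_cons, List.sum_cons]
      rw [ih _ (by rw [pv_length_inner, hlen]), pv_inner ys acc x m hlen hm]
      ring

-- with nodup in-range ys, the inner count is a membership indicator
theorem pv_count_indicator (ys : List Int) (x m : Int) (hnd : ys.Nodup)
    (hr : ∀ y ∈ ys, 0 ≤ y ∧ y < 12) (hm : 0 ≤ m ∧ m < 12) :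
    ys.countP (fun y => decide (PySem.Int.mod (x + y) 12 = m))
      = if PySem.Int.mod (m - x) 12 ∈ ys then 1 else 0 := by
  have hiff : ∀ y ∈ ys, (PySem.Int.mod (x + y) 12 = m ↔ y = PySem.Int.mod (m - x) 12) := by
    intro y hy
    rw [PySem.Int.mod_eq_emod_of_pos (b := 12) (by norm_num),
        PySem.Int.mod_eq_emod_of_pos (b := 12) (by norm_num)]
    have := hr y hy
    omega
  rw [List.countP_congr (q := fun y => decide (y = PySem.Int.mod (m - x) 12)) (fun y hy => by
    simp only [decide_eq_true_eq]; exact hiff y hy)]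
  by_cases hmem : PySem.Int.mod (m - x) 12 ∈ ys
  · rw [if_pos hmem]
    have hpred : (fun y : Int => decide (y = PySem.Int.mod (m - x) 12))
        = (fun y : Int => y == PySem.Int.mod (m - x) 12) := by
      funext y
      rw [Bool.beq_eq_decide_eq]
    rw [hpred, ← List.count_eq_countP, List.count_eq_one_of_mem hnd hmem]
  · rw [if_neg hmem, List.countP_eq_zero]
    intro y hy
    rw [decide_eq_true_eq]
    intro h
    rw [h] at hy
    exact hmem hy

-- B's per-n test ⟺ every element of S maps back into S under TnI
theorem pv_B_test (pcs : List Int) (n : Int) :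
    ((PySem.List.pyGetD
        ((PySem.Set.ofList (pcs.map (fun pc => PySem.Int.mod pc 12))).foldl (fun sums x =>
          (PySem.Set.ofList (pcs.map (fun pc => PySem.Int.mod pc 12))).foldl (fun sums y =>
            PySem.List.pySetD sums (PySem.Int.mod (x + y) 12)
              (PySem.List.pyGetD sums (PySem.Int.mod (x + y) 12) 0 + 1)) sums)
          (List.replicate 12 0))
        (PySem.Int.mod (n + 11) 12) 0
      == PySem.Set.len (PySem.Set.ofList (pcs.map (fun pc => PySem.Int.mod pc 12)))) = true)
    ↔ (∀ x ∈ PySem.Set.ofList (pcs.map (fun pc => PySem.Int.mod pc 12)),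
        PySem.Int.mod (11 - x + n) 12 ∈ PySem.Set.ofList (pcs.map (fun pc => PySem.Int.mod pc 12))) := by
  set S := PySem.Set.ofList (pcs.map (fun pc => PySem.Int.mod pc 12)) with hS
  have hnd : S.Nodup := hS ▸ PySem.Set.nodup_ofList _
  have hr : ∀ y ∈ S, 0 ≤ y ∧ y < 12 := by
    intro y hy
    have hxm : y ∈ pcs.map (fun pc => PySem.Int.mod pc 12) :=
      (PySem.Set.mem_ofList (pcs.map (fun pc => PySem.Int.mod pc 12)) y).mp (hS ▸ hy)
    obtain ⟨pc, _, rfl⟩ := List.mem_map.mp hxm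
    exact pv_mod12_range pc
  have hmodmod : ∀ x : Int, PySem.Int.mod (PySem.Int.mod (n + 11) 12 - x) 12
      = PySem.Int.mod (11 - x + n) 12 := by
    intro x
    rw [PySem.Int.mod_eq_emod_of_pos (b := 12) (by norm_num),
        PySem.Int.mod_eq_emod_of_pos (b := 12) (by norm_num),
        PySem.Int.mod_eq_emod_of_pos (b := 12) (by norm_num)]
    omega
  rw [beq_iff_eq,
      pv_outer S S (List.replicate 12 0) _ (by simp) (pv_mod12_range _)]
  have hmap : S.map (fun x => ((S.countP (fun y =>
        decide (PySem.Int.mod (x + y) 12 = PySem.Int.mod (n + 11) 12)) : Nat) : Int))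
      = S.map (fun x => if (decide (PySem.Int.mod (11 - x + n) 12 ∈ S)) = true
          then (1 : Int) else 0) := by
    apply List.map_congr_left
    intro x _
    rw [pv_count_indicator S x _ hnd hr (pv_mod12_range _), hmodmod x]
    split_ifs with h1 h2 h3
    · rfl
    · rw [decide_eq_true_eq] at h2; exact absurd h1 h2
    · rw [decide_eq_true_eq] at h3; exact absurd h3 h1
    · rfl
  rw [hmap, PySem.List.sum_map_ite_one_zero]
  have hget0 : PySem.List.pyGetD (List.replicate 12 (0:Int)) (PySem.Int.mod (n + 11) 12) 0 = 0 := by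
    rw [PySem.List.pyGetD_eq_getElem _ 0 (pv_mod12_range _).1
        (by push_cast [List.length_replicate]; exact (pv_mod12_range _).2),
      List.getElem_replicate]
  rw [hget0, zero_add]
  have hlen : PySem.Set.len S = (S.length : Int) := rfl
  rw [hlen]
  constructor
  · intro h x hx
    have hcnt : S.countP (fun x => decide (PySem.Int.mod (11 - x + n) 12 ∈ S)) = S.length := by
      exact_mod_cast h
    have := (List.countP_eq_length).mp hcnt x hx
    rwa [decide_eq_true_eq] at this
  · intro h
    have hcnt : S.countP (fun x => decide (PySem.Int.mod (11 - x + n) 12 ∈ S)) = S.length :=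
      List.countP_eq_length.mpr (fun x hx => by rw [decide_eq_true_eq]; exact h x hx)
    exact_mod_cast hcnt

-- ===== VERDICT (by name: the statement is the Claim_ definition above) =====
theorem invariant_under_TnI_spec : Claim_equal_invariant_under_TnI := by
  intro pcs _
  unfold Spec_invariant_under_TnI invariant_under_TnI invariant_under_TnI_alt
  simp only []
  rw [PySem.List.foldl_append_ite_eq_filter, List.nil_append]
  apply List.filter_congr
  intro n _
  rcases hb : ((PySem.List.pyGetD
      ((PySem.Set.ofList (pcs.map (fun pc => PySem.Int.mod pc 12))).foldl (fun sums x =>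
        (PySem.Set.ofList (pcs.map (fun pc => PySem.Int.mod pc 12))).foldl (fun sums y =>
          PySem.List.pySetD sums (PySem.Int.mod (x + y) 12)
            (PySem.List.pyGetD sums (PySem.Int.mod (x + y) 12) 0 + 1)) sums)
        (List.replicate 12 0))
      (PySem.Int.mod (n + 11) 12) 0
    == PySem.Set.len (PySem.Set.ofList (pcs.map (fun pc => PySem.Int.mod pc 12))))) with _ | _
  · rw [decide_eq_false_iff_not]
    intro hcontra
    have h1 := (pv_A_test pcs n).mp hcontra
    have h2 := (pv_B_test pcs n).mpr h1
    rw [hb] at h2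
    exact Bool.false_ne_true h2
  · rw [decide_eq_true_eq]
    exact (pv_A_test pcs n).mpr ((pv_B_test pcs n).mp hb)
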